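-- pv_equiv track=rewrite | github.com/KnpA/segment_thematique | Segm_them_C99.py | calcule_S_i_j
-- ===== SOURCE A (Python) =====
-- def calcule_S_i_j(ranking_matrice):
-- 	taille=len(ranking_matrice);
-- 	MATRICE=[ [0]*taille for a in range(taille)];
--
-- 	# 1ere étape:
-- 	for i in range(0,taille):
-- 		MATRICE[i][i]=ranking_matrice[i][i];
-- 	#2eme étape:
-- 	for i in range(0,taille-1):
-- 		val=2*ranking_matrice[i+1][i] +MATRICE[i][i]+MATRICE[i+1][i+1];
-- 		MATRICE[i+1][i]=val;
-- 		MATRICE[i][i+1]=val;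
-- 	#3eme étape:
-- 	for j in range(2,taille):
-- 		for i in range(0,taille-j):
-- 			val=2*ranking_matrice[i+j][i]+MATRICE[i+j-1][i]+MATRICE[i+j][i+1]-MATRICE[i+j-1][i+1];
-- 			MATRICE[i][i+j]=val;
-- 			MATRICE[i+j][i]=val;
-- 	return MATRICE;
-- ===== SOURCE B (Python) =====
-- def calcule_S_i_j(ranking_matrice):
--     n = len(ranking_matrice)
--     # pref[k][t] = sum of ranking_matrice[k][b] for b < t   (t <= k: lower triangle only)
--     pref = []
--     for k in range(n):
--         p = [0]
--         for b in range(k):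
--             p.append(p[b] + ranking_matrice[k][b])
--         pref.append(p)
--     out = [[0] * n for _ in range(n)]
--     for i in range(n):
--         s = 0
--         for j in range(i, n):
--             s += ranking_matrice[j][j] + 2 * (pref[j][j] - pref[j][i])
--             out[i][j] = s
--             out[j][i] = s
--     return out
-- ===== Notes on version B (the rewrite author's own statement) =====
-- stated objective: alternative
-- what changed: Replaces A's band-by-band DP recurrence (filling diagonals of increasing offset from three previously filled cells) with per-row prefix sums of the lower triangle plus a row-extension accumulation: S(i,j) = S(i,j-1) + r[j][j] + 2*(pref[j][j]-pref[j][i]).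
import Mathlib
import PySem

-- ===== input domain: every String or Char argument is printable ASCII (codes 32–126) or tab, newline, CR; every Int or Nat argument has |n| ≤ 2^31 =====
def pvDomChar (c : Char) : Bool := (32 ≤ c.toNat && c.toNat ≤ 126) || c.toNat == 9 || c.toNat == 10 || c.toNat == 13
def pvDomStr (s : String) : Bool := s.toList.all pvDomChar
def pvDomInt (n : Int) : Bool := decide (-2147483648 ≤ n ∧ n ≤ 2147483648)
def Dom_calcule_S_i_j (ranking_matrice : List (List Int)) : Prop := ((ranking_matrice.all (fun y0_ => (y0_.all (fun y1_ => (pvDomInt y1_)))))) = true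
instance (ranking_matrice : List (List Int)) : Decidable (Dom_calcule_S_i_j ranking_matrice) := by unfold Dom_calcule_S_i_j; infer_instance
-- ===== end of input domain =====

-- B replaces A's band-by-band DP with per-row prefix sums plus a row-extension accumulation
-- (alternative algorithm, same O(n^2) cost); equivalence is about the return value only.

-- shared tiny helpers: m[i][j] read with default 0 (all indices used are in range under Pre_)
-- and the write m[i][j] = v (Python list assignment at an in-range index; List.set is exact there)
def pvGet2 (m : List (List Int)) (i j : Nat) : Int := (m.getD i []).getD j 0
def pvSet2 (m : List (List Int)) (i j : Nat) (v : Int) : List (List Int) :=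
  m.set i ((m.getD i []).set j v)
-- MATRICE=[[0]*taille for a in range(taille)] — also B's `out` initialisation
def pvZeros (n : Nat) : List (List Int) := (List.range n).map (fun _ => List.replicate n (0:Int))

-- ===== PORT A =====
-- the three commented phases of A, step for step
def pvA_phase1 (r M : List (List Int)) : List (List Int) :=
  (List.range r.length).foldl (fun M i => pvSet2 M i i (pvGet2 r i i)) M
def pvA_phase2 (r M : List (List Int)) : List (List Int) :=
  (List.range (r.length - 1)).foldl (fun M i =>
    let val := 2 * pvGet2 r (i+1) i + pvGet2 M i i + pvGet2 M (i+1) (i+1)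
    pvSet2 (pvSet2 M (i+1) i val) i (i+1) val) M
def pvA_phase3 (r M : List (List Int)) : List (List Int) :=
  (List.range' 2 (r.length - 2)).foldl (fun M j =>    -- range(2, taille)
    (List.range (r.length - j)).foldl (fun M i =>
      let val := 2 * pvGet2 r (i+j) i + pvGet2 M (i+j-1) i
                 + pvGet2 M (i+j) (i+1) - pvGet2 M (i+j-1) (i+1)
      pvSet2 (pvSet2 M i (i+j) val) (i+j) i val) M) M

def calcule_S_i_j (ranking_matrice : List (List Int)) : List (List Int) :=
  pvA_phase3 ranking_matrice
    (pvA_phase2 ranking_matrice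
      (pvA_phase1 ranking_matrice (pvZeros ranking_matrice.length)))

-- ===== PORT B =====
-- pref row k: p = [0]; for b in range(k): p.append(p[b] + r[k][b])
def pvB_prefRow (r : List (List Int)) (k : Nat) : List Int :=
  (List.range k).foldl (fun p b => p ++ [p.getD b 0 + pvGet2 r k b]) [(0:Int)]
def pvB_pref (r : List (List Int)) : List (List Int) :=
  (List.range r.length).foldl (fun acc k => acc ++ [pvB_prefRow r k]) []
-- inner loop of B: s accumulates the block sum while j grows; writes out[i][j] and out[j][i]
def pvB_inner (r pref : List (List Int)) (i : Nat) (out : List (List Int)) :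
    List (List Int) × Int :=
  (List.range' i (r.length - i)).foldl (fun st j =>    -- for j in range(i, n)
    let s := st.2 + pvGet2 r j j + 2 * (pvGet2 pref j j - pvGet2 pref j i)
    (pvSet2 (pvSet2 st.1 i j s) j i s, s)) (out, (0:Int))

def calcule_S_i_j_alt (ranking_matrice : List (List Int)) : List (List Int) :=
  let pref := pvB_pref ranking_matrice
  (List.range ranking_matrice.length).foldl
    (fun out i => (pvB_inner ranking_matrice pref i out).1)
    (pvZeros ranking_matrice.length)

-- ===== PRECONDITION & SPEC =====
-- A reads only the diagonal and the strict lower triangle; it raises IndexError iff some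
-- row k is shorter than k+1 entries. Pre_ excludes exactly those inputs.
def Pre_calcule_S_i_j (ranking_matrice : List (List Int)) : Prop :=
  ∀ k ∈ List.range ranking_matrice.length, k < (ranking_matrice.getD k []).length
instance (ranking_matrice : List (List Int)) : Decidable (Pre_calcule_S_i_j ranking_matrice) := by
  unfold Pre_calcule_S_i_j; infer_instance
def pvWitness_calcule_S_i_j : List (List Int) := [[1], [2, 3], [4, -5, 6]]

def Spec_calcule_S_i_j (ranking_matrice : List (List Int)) (out : List (List Int)) : Prop := out = calcule_S_i_j_alt ranking_matrice
instance (ranking_matrice : List (List Int)) (out : List (List Int)) : Decidable (Spec_calcule_S_i_j ranking_matrice out) := by unfold Spec_calcule_S_i_j; infer_instance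

-- ===== CLAIM (what is proved, stated in full; the proofs are below) =====
def Claim_equal_calcule_S_i_j : Prop := ∀ (ranking_matrice : List (List Int)), Dom_calcule_S_i_j ranking_matrice → Pre_calcule_S_i_j ranking_matrice → Spec_calcule_S_i_j ranking_matrice (calcule_S_i_j ranking_matrice)

-- ===== LEMMAS AND PROOFS =====

-- partial row sum: sum of r[k][b] for b < t
def pvRowSum (r : List (List Int)) (k t : Nat) : Int :=
  ((List.range t).map (fun b => pvGet2 r k b)).sum
-- contribution of row k to a block starting at lo: r[k][k] + 2 * sum_{lo<=b<k} r[k][b]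
def pvTerm (r : List (List Int)) (k lo : Nat) : Int :=
  pvGet2 r k k + 2 * (pvRowSum r k k - pvRowSum r k lo)
-- the block value S(i,j) both programs compute at entry (i,j), i ≤ j
def pvS (r : List (List Int)) (i j : Nat) : Int :=
  ((List.range' i (j + 1 - i)).map (fun k => pvTerm r k i)).sum

def pvShape (n : Nat) (M : List (List Int)) : Prop :=
  M.length = n ∧ ∀ row ∈ M, row.length = n

-- invariant of A's fill: entries at diagonal distance < j, plus those at distance j whose
-- lower index is < c, already hold their block value; everything else is still 0
def pvStateA (r : List (List Int)) (j c : Nat) (M : List (List Int)) : Prop :=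
  pvShape r.length M ∧ ∀ a b : Nat, a < r.length → b < r.length →
    pvGet2 M a b = if max a b - min a b < j ∨ (max a b - min a b = j ∧ min a b < c)
                   then pvS r (min a b) (max a b) else 0

-- invariant of B's fill: all entries whose lower index is < c are done
def pvStateB (r : List (List Int)) (c : Nat) (M : List (List Int)) : Prop :=
  pvShape r.length M ∧ ∀ a b : Nat, a < r.length → b < r.length →
    pvGet2 M a b = if min a b < c then pvS r (min a b) (max a b) else 0


-- inner invariant of B's accumulation at outer row i, inner position j'
def pvStateBI (r : List (List Int)) (i j' : Nat) (st : List (List Int) × Int) : Prop :=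
  pvShape r.length st.1 ∧
  st.2 = (if i < j' then pvS r i (j' - 1) else 0) ∧
  ∀ a b : Nat, a < r.length → b < r.length →
    pvGet2 st.1 a b = if min a b < i ∨ (min a b = i ∧ max a b < j')
                      then pvS r (min a b) (max a b) else 0

-- == basic matrix lemmas ==

theorem pvShape_zeros (n : Nat) : pvShape n (pvZeros n) := by
  constructor
  · simp [pvZeros]
  · intro row hrow
    obtain ⟨a, -, rfl⟩ := List.mem_map.mp hrow
    simp

theorem pvGet2_zeros (n a b : Nat) : pvGet2 (pvZeros n) a b = 0 := by
  have hz : pvZeros n = List.replicate n (List.replicate n (0:Int)) := by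
    unfold pvZeros; rw [List.map_const', List.length_range]
  rw [hz]
  unfold pvGet2
  rcases Nat.lt_or_ge a n with h | h
  · have h1 : (List.replicate n (List.replicate n (0:Int))).getD a [] = List.replicate n (0:Int) := by
      rw [List.getD_eq_getElem _ _ (by simpa using h), List.getElem_replicate]
    rw [h1]
    rcases Nat.lt_or_ge b n with h2 | h2
    · rw [List.getD_eq_getElem _ _ (by simpa using h2), List.getElem_replicate]
    · rw [List.getD_eq_default _ _ (by simpa using h2)]
  · have h1 : (List.replicate n (List.replicate n (0:Int))).getD a [] = [] := by
      rw [List.getD_eq_default _ _ (by simpa using h)]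
    rw [h1]
    rfl

theorem pvShape_set2 {n : Nat} {M : List (List Int)} (hM : pvShape n M)
    (i j : Nat) (v : Int) (hi : i < n) : pvShape n (pvSet2 M i j v) := by
  obtain ⟨hl, hr⟩ := hM
  refine ⟨by simp [pvSet2, hl], ?_⟩
  intro row hrow
  rcases List.mem_or_eq_of_mem_set hrow with h | h
  · exact hr row h
  · subst h
    rw [List.length_set]
    have hiM : i < M.length := by omega
    rw [List.getD_eq_getElem _ _ hiM]
    exact hr _ (List.getElem_mem hiM)

theorem pvGet2_set2 {n : Nat} {M : List (List Int)} (hM : pvShape n M)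
    {i j : Nat} (hi : i < n) (hj : j < n) (v : Int) (a b : Nat) :
    pvGet2 (pvSet2 M i j v) a b = if a = i ∧ b = j then v else pvGet2 M a b := by
  obtain ⟨hl, hr⟩ := hM
  have hiM : i < M.length := by omega
  have hrowlen : (M.getD i []).length = n := by
    rw [List.getD_eq_getElem _ _ hiM]; exact hr _ (List.getElem_mem hiM)
  unfold pvGet2 pvSet2
  by_cases hai : a = i
  · subst hai
    have h1 : (M.set a ((M.getD a []).set j v)).getD a [] = (M.getD a []).set j v := by
      rw [List.getD_eq_getElem _ _ (by simpa using hiM), List.getElem_set_self]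
    rw [h1]
    by_cases hbj : b = j
    · subst hbj
      rw [if_pos ⟨rfl, rfl⟩,
        List.getD_eq_getElem _ _ (by rw [List.length_set]; omega), List.getElem_set_self]
    · rw [if_neg (fun hc => hbj hc.2)]
      rcases Nat.lt_or_ge b (M.getD a []).length with hblt | hbge
      · rw [List.getD_eq_getElem _ _ (by rw [List.length_set]; exact hblt),
          List.getD_eq_getElem _ _ hblt]
        exact List.getElem_set_ne (by omega) _
      · rw [List.getD_eq_default _ _ (by rw [List.length_set]; exact hbge),
          List.getD_eq_default _ _ hbge]
  · rw [if_neg (fun hc => hai hc.1)]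
    have h2 : (M.set i ((M.getD i []).set j v)).getD a [] = M.getD a [] := by
      rcases Nat.lt_or_ge a M.length with ha | ha
      · rw [List.getD_eq_getElem _ _ (by simpa using ha), List.getD_eq_getElem _ _ ha]
        exact List.getElem_set_ne (by omega) _
      · rw [List.getD_eq_default _ _ (by simpa using ha), List.getD_eq_default _ _ ha]
    rw [h2]

theorem pvShape_ext {n : Nat} {M M' : List (List Int)} (h1 : pvShape n M) (h2 : pvShape n M')
    (h : ∀ a b, a < n → b < n → pvGet2 M a b = pvGet2 M' a b) : M = M' := by
  apply List.ext_getElem (by rw [h1.1, h2.1])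
  intro a ha ha'
  have han : a < n := by rw [← h1.1]; exact ha
  have r1 : M[a].length = n := h1.2 _ (List.getElem_mem ha)
  have r2 : M'[a].length = n := h2.2 _ (List.getElem_mem ha')
  apply List.ext_getElem (by rw [r1, r2])
  intro b hb hb'
  have hbn : b < n := by omega
  have hg := h a b han hbn
  unfold pvGet2 at hg
  rw [List.getD_eq_getElem _ _ ha, List.getD_eq_getElem _ _ ha'] at hg
  rw [List.getD_eq_getElem _ _ hb, List.getD_eq_getElem _ _ hb'] at hg
  exact hg

-- generic invariant lemma for a left fold over range'
theorem pvFoldInv {sigma : Type} (g : sigma → Nat → sigma) (P : Nat → sigma → Prop)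
    (lo len : Nat) (s0 : sigma) (h0 : P lo s0)
    (hstep : ∀ k s, lo ≤ k → k < lo + len → P k s → P (k+1) (g s k)) :
    P (lo + len) ((List.range' lo len).foldl g s0) := by
  induction len generalizing lo s0 with
  | zero => simpa using h0
  | succ m ih =>
    rw [List.range'_succ, List.foldl_cons]
    have h' := ih (lo+1) (g s0 lo) (hstep lo s0 le_rfl (by omega) h0)
      (fun k s hk1 hk2 hP => hstep k s (by omega) (by omega) hP)
    rw [show lo + (m+1) = lo + 1 + m from by omega]
    exact h'

-- == arithmetic facts about the block value pvS ==

theorem pvRowSum_succ (r : List (List Int)) (k t : Nat) :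
    pvRowSum r k (t+1) = pvRowSum r k t + pvGet2 r k t := by
  unfold pvRowSum; rw [List.range_succ]; simp

theorem pvS_single (r : List (List Int)) (i : Nat) : pvS r i i = pvTerm r i i := by
  unfold pvS
  rw [show i + 1 - i = 1 from by omega, List.range'_succ]
  simp

theorem pvS_self (r : List (List Int)) (i : Nat) : pvS r i i = pvGet2 r i i := by
  rw [pvS_single]; unfold pvTerm; ring

theorem pvS_empty (r : List (List Int)) (i j : Nat) (h : j < i) : pvS r i j = 0 := by
  unfold pvS; rw [show j + 1 - i = 0 from by omega]; simp

theorem pvS_last (r : List (List Int)) (i j : Nat) (h : i ≤ j + 1) :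
    pvS r i (j+1) = pvS r i j + pvTerm r (j+1) i := by
  unfold pvS
  rw [show j + 1 + 1 - i = (j + 1 - i) + 1 from by omega, List.range'_concat,
      show i + 1 * (j + 1 - i) = j + 1 from by omega]
  simp

theorem pvS_first (r : List (List Int)) (i j : Nat) (h : i ≤ j) :
    pvS r i j = pvTerm r i i + pvS r (i+1) j
      + 2 * ((List.range' (i+1) (j - i)).map (fun k => pvGet2 r k i)).sum := by
  unfold pvS
  rw [show j + 1 - i = (j - i) + 1 from by omega, List.range'_succ]
  simp only [List.map_cons, List.sum_cons]
  rw [show j + 1 - (i + 1) = j - i from by omega]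
  have hterm : ∀ k, pvTerm r k i = pvTerm r k (i+1) + 2 * pvGet2 r k i := by
    intro k; unfold pvTerm; rw [pvRowSum_succ]; ring
  rw [List.map_congr_left (fun k _ => hterm k), List.sum_map_add, List.sum_map_mul_left]
  ring

theorem pvS_band (r : List (List Int)) (i d : Nat) (h : 1 ≤ d) :
    pvS r i (i + d) = 2 * pvGet2 r (i + d) i + pvS r i (i + d - 1)
      + pvS r (i+1) (i + d) - pvS r (i+1) (i + d - 1) := by
  have h1 := pvS_first r i (i + d) (by omega)
  have h2 := pvS_first r i (i + d - 1) (by omega)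
  rw [show i + d - i = d from by omega] at h1
  rw [show i + d - 1 - i = d - 1 from by omega] at h2
  have h3 : List.range' (i+1) d = List.range' (i+1) (d-1) ++ [i + d] := by
    calc List.range' (i+1) d = List.range' (i+1) ((d-1)+1) := by rw [show d - 1 + 1 = d from by omega]
    _ = List.range' (i+1) (d-1) ++ [i + 1 + 1 * (d-1)] := List.range'_concat
    _ = List.range' (i+1) (d-1) ++ [i + d] := by rw [show i + 1 + 1 * (d-1) = i + d from by omega]
  rw [h3, List.map_append, List.sum_append] at h1
  simp only [List.map_cons, List.map_nil, List.sum_cons, List.sum_nil] at h1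
  rw [h1, h2]; ring

-- == invariant transport ==

theorem pvStateA_shift {r : List (List Int)} {j c j' c' : Nat} {M : List (List Int)}
    (h : pvStateA r j c M)
    (hiff : ∀ a b : Nat, a < r.length → b < r.length →
      ((max a b - min a b < j ∨ (max a b - min a b = j ∧ min a b < c)) ↔
       (max a b - min a b < j' ∨ (max a b - min a b = j' ∧ min a b < c')))) :
    pvStateA r j' c' M :=
  ⟨h.1, fun a b ha hb => by rw [h.2 a b ha hb]; exact if_congr (hiff a b ha hb) rfl rfl⟩

-- == port A: the three phases preserve/extend the invariant ==

theorem pvA_phase1_state (r M : List (List Int)) (h : pvStateA r 0 0 M) :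
    pvStateA r 0 r.length (pvA_phase1 r M) := by
  unfold pvA_phase1
  rw [List.range_eq_range']
  have key := pvFoldInv (fun M i => pvSet2 M i i (pvGet2 r i i)) (fun c M => pvStateA r 0 c M)
    0 r.length M h ?_
  · simpa using key
  · intro i M' _ hi hM'
    have hin : i < r.length := by omega
    refine ⟨pvShape_set2 hM'.1 i i _ hin, ?_⟩
    intro a b ha hb
    rw [pvGet2_set2 hM'.1 hin hin _ a b]
    by_cases hc : a = i ∧ b = i
    · rw [if_pos hc, if_pos (by omega), show min a b = a from by omega,
        show max a b = a from by omega, pvS_self]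
      rw [show a = i from hc.1]
    · rw [if_neg hc, hM'.2 a b ha hb]
      exact if_congr (by omega) rfl rfl

theorem pvA_phase2_state (r M : List (List Int)) (h : pvStateA r 1 0 M) :
    pvStateA r 1 (r.length - 1) (pvA_phase2 r M) := by
  unfold pvA_phase2
  rw [List.range_eq_range']
  have key := pvFoldInv
    (fun M i =>
      let val := 2 * pvGet2 r (i+1) i + pvGet2 M i i + pvGet2 M (i+1) (i+1)
      pvSet2 (pvSet2 M (i+1) i val) i (i+1) val)
    (fun c M => pvStateA r 1 c M) 0 (r.length - 1) M h ?_
  · simpa using key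
  · intro i M' _ hi hM'
    have hi1 : i + 1 < r.length := by omega
    have hi0 : i < r.length := by omega
    set val := 2 * pvGet2 r (i+1) i + pvGet2 M' i i + pvGet2 M' (i+1) (i+1) with hval
    show pvStateA r 1 (i+1) (pvSet2 (pvSet2 M' (i+1) i val) i (i+1) val)
    have e1 : pvGet2 M' i i = pvS r i i := by
      have he := hM'.2 i i hi0 hi0
      rw [show min i i = i from by omega, show max i i = i from by omega] at he
      rw [he, if_pos (by omega)]
    have e2 : pvGet2 M' (i+1) (i+1) = pvS r (i+1) (i+1) := by
      have he := hM'.2 (i+1) (i+1) hi1 hi1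
      rw [show min (i+1) (i+1) = i+1 from by omega, show max (i+1) (i+1) = i+1 from by omega] at he
      rw [he, if_pos (by omega)]
    have hb := pvS_band r i 1 le_rfl
    rw [show i + 1 - 1 = i from by omega, pvS_empty r (i+1) i (by omega)] at hb
    have hv : val = pvS r i (i+1) := by rw [hval, e1, e2, hb]; ring
    have hs1 := pvShape_set2 hM'.1 (i+1) i val hi1
    refine ⟨pvShape_set2 hs1 i (i+1) val hi0, ?_⟩
    intro a b ha hb2
    rw [pvGet2_set2 hs1 hi0 hi1 _ a b, pvGet2_set2 hM'.1 hi1 hi0 _ a b]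
    by_cases c1 : a = i ∧ b = i + 1
    · rw [if_pos c1, if_pos (by omega), show min a b = i from by omega,
        show max a b = i + 1 from by omega, hv]
    · by_cases c2 : a = i + 1 ∧ b = i
      · rw [if_neg c1, if_pos c2, if_pos (by omega), show min a b = i from by omega,
          show max a b = i + 1 from by omega, hv]
      · rw [if_neg c1, if_neg c2, hM'.2 a b ha hb2]
        exact if_congr (by omega) rfl rfl

theorem pvA_phase3_state (r M : List (List Int)) (h : pvStateA r 2 0 M) :
    pvStateA r (2 + (r.length - 2)) 0 (pvA_phase3 r M) := by
  unfold pvA_phase3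
  refine pvFoldInv _ (fun j M => pvStateA r j 0 M) 2 (r.length - 2) M h ?_
  intro j M' hj2 hjn hM'
  have hinner := pvFoldInv
    (fun M i =>
      let val := 2 * pvGet2 r (i+j) i + pvGet2 M (i+j-1) i
                 + pvGet2 M (i+j) (i+1) - pvGet2 M (i+j-1) (i+1)
      pvSet2 (pvSet2 M i (i+j) val) (i+j) i val)
    (fun c M => pvStateA r j c M) 0 (r.length - j) M' hM' ?_
  · rw [show (0 : Nat) + (r.length - j) = r.length - j from by omega] at hinner
    rw [List.range_eq_range']
    exact pvStateA_shift hinner (fun a b ha hb => by omega)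
  · intro i Mi _ hi hMi
    have hij : i + j < r.length := by omega
    set val := 2 * pvGet2 r (i+j) i + pvGet2 Mi (i+j-1) i
               + pvGet2 Mi (i+j) (i+1) - pvGet2 Mi (i+j-1) (i+1) with hval
    show pvStateA r j (i+1) (pvSet2 (pvSet2 Mi i (i+j) val) (i+j) i val)
    have e1 : pvGet2 Mi (i+j-1) i = pvS r i (i+j-1) := by
      have he := hMi.2 (i+j-1) i (by omega) (by omega)
      rw [show min (i+j-1) i = i from by omega, show max (i+j-1) i = i+j-1 from by omega] at he
      rw [he, if_pos (by omega)]
    have e2 : pvGet2 Mi (i+j) (i+1) = pvS r (i+1) (i+j) := by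
      have he := hMi.2 (i+j) (i+1) (by omega) (by omega)
      rw [show min (i+j) (i+1) = i+1 from by omega, show max (i+j) (i+1) = i+j from by omega] at he
      rw [he, if_pos (by omega)]
    have e3 : pvGet2 Mi (i+j-1) (i+1) = pvS r (i+1) (i+j-1) := by
      have he := hMi.2 (i+j-1) (i+1) (by omega) (by omega)
      rw [show min (i+j-1) (i+1) = i+1 from by omega, show max (i+j-1) (i+1) = i+j-1 from by omega] at he
      rw [he, if_pos (by omega)]
    have hbd := pvS_band r i j (by omega)
    have hv : val = pvS r i (i+j) := by rw [hval, e1, e2, e3, hbd]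
    have hs1 := pvShape_set2 hMi.1 i (i+j) val (by omega)
    refine ⟨pvShape_set2 hs1 (i+j) i val (by omega), ?_⟩
    intro a b ha hb2
    rw [pvGet2_set2 hs1 (by omega) (by omega) _ a b, pvGet2_set2 hMi.1 (by omega) (by omega) _ a b]
    by_cases c1 : a = i + j ∧ b = i
    · rw [if_pos c1, if_pos (by omega), show min a b = i from by omega,
        show max a b = i + j from by omega, hv]
    · by_cases c2 : a = i ∧ b = i + j
      · rw [if_neg c1, if_pos c2, if_pos (by omega), show min a b = i from by omega,
          show max a b = i + j from by omega, hv]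
      · rw [if_neg c1, if_neg c2, hMi.2 a b ha hb2]
        exact if_congr (by omega) rfl rfl

theorem portA_final (r : List (List Int)) :
    pvShape r.length (calcule_S_i_j r) ∧ ∀ a b : Nat, a < r.length → b < r.length →
      pvGet2 (calcule_S_i_j r) a b = pvS r (min a b) (max a b) := by
  have s0 : pvStateA r 0 0 (pvZeros r.length) := by
    refine ⟨pvShape_zeros _, ?_⟩
    intro a b ha hb
    rw [pvGet2_zeros, if_neg (by omega)]
  have s1 := pvA_phase1_state r _ s0
  have s1' := pvStateA_shift (j' := 1) (c' := 0) s1 (fun a b ha hb => by omega)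
  have s2 := pvA_phase2_state r _ s1'
  have s2' := pvStateA_shift (j' := 2) (c' := 0) s2 (fun a b ha hb => by omega)
  have s3 := pvA_phase3_state r _ s2'
  unfold calcule_S_i_j
  refine ⟨s3.1, ?_⟩
  intro a b ha hb
  rw [s3.2 a b ha hb, if_pos (by omega)]

-- == port B: prefix rows compute pvRowSum; the accumulation computes pvS ==

theorem pvB_prefRow_eq (r : List (List Int)) (k : Nat) :
    pvB_prefRow r k = (List.range (k+1)).map (fun t => pvRowSum r k t) := by
  unfold pvB_prefRow
  rw [List.range_eq_range' (n := k)]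
  have key := pvFoldInv (fun p b => p ++ [p.getD b 0 + pvGet2 r k b])
    (fun b p => p = (List.range (b+1)).map (fun t => pvRowSum r k t)) 0 k [(0:Int)] ?_ ?_
  · simpa using key
  · show [(0:Int)] = (List.range 1).map fun t => pvRowSum r k t
    simp [pvRowSum]
  · intro b p _ hb hp
    rw [hp]
    show (List.range (b+1)).map (fun t => pvRowSum r k t) ++
        [((List.range (b+1)).map (fun t => pvRowSum r k t)).getD b 0 + pvGet2 r k b]
      = (List.range (b+1+1)).map (fun t => pvRowSum r k t)
    have hget : ((List.range (b+1)).map (fun t => pvRowSum r k t)).getD b 0 = pvRowSum r k b := by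
      rw [List.getD_eq_getElem _ _ (by simp)]
      simp
    have hsplit : (List.range (b+1+1)).map (fun t => pvRowSum r k t)
        = (List.range (b+1)).map (fun t => pvRowSum r k t) ++ [pvRowSum r k (b+1)] := by
      rw [List.range_succ]; simp
    rw [hget, hsplit, pvRowSum_succ]

theorem pvB_pref_eq (r : List (List Int)) :
    pvB_pref r = (List.range r.length).map (pvB_prefRow r) := by
  unfold pvB_pref
  conv_lhs => rw [List.range_eq_range']
  have key := pvFoldInv (fun acc k => acc ++ [pvB_prefRow r k])
    (fun k acc => acc = (List.range k).map (pvB_prefRow r)) 0 r.length [] (by simp) ?_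
  · simpa using key
  · intro k acc _ hk hacc
    rw [hacc]
    have hsplit : (List.range (k+1)).map (pvB_prefRow r)
        = (List.range k).map (pvB_prefRow r) ++ [pvB_prefRow r k] := by
      rw [List.range_succ]; simp
    rw [hsplit]

theorem pvGet2_pref (r : List (List Int)) {k t : Nat} (hk : k < r.length) (ht : t ≤ k) :
    pvGet2 (pvB_pref r) k t = pvRowSum r k t := by
  unfold pvGet2
  rw [pvB_pref_eq]
  have h1 : ((List.range r.length).map (pvB_prefRow r)).getD k [] = pvB_prefRow r k := by
    rw [List.getD_eq_getElem _ _ (by simpa using hk)]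
    simp
  rw [h1, pvB_prefRow_eq, List.getD_eq_getElem _ _ (by simp; omega)]
  simp

theorem pvB_inner_state (r : List (List Int)) (i : Nat) (hi : i < r.length)
    (out : List (List Int)) (h : pvStateB r i out) :
    pvStateB r (i+1) (pvB_inner r (pvB_pref r) i out).1 := by
  unfold pvB_inner
  have key := pvFoldInv
    (fun (st : List (List Int) × Int) j =>
      let s := st.2 + pvGet2 r j j + 2 * (pvGet2 (pvB_pref r) j j - pvGet2 (pvB_pref r) j i)
      (pvSet2 (pvSet2 st.1 i j s) j i s, s))
    (fun j' st => pvStateBI r i j' st) i (r.length - i) (out, (0:Int)) ?_ ?_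
  · rw [show i + (r.length - i) = r.length from by omega] at key
    refine ⟨key.1, ?_⟩
    intro a b ha hb
    rw [key.2.2 a b ha hb]
    exact if_congr (by omega) rfl rfl
  · refine ⟨h.1, by simp, ?_⟩
    intro a b ha hb
    rw [h.2 a b ha hb]
    exact if_congr (by omega) rfl rfl
  · intro j st hij hj hQ
    obtain ⟨hsh, hs, hent⟩ := hQ
    have hjn : j < r.length := by omega
    set s' := st.2 + pvGet2 r j j + 2 * (pvGet2 (pvB_pref r) j j - pvGet2 (pvB_pref r) j i) with hs'def
    show pvStateBI r i (j+1) (pvSet2 (pvSet2 st.1 i j s') j i s', s')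
    have hterm : s' = st.2 + pvTerm r j i := by
      rw [hs'def, pvGet2_pref r hjn le_rfl, pvGet2_pref r hjn (by omega)]
      unfold pvTerm; ring
    have hv : s' = pvS r i j := by
      rcases Nat.eq_or_lt_of_le hij with heq | hlt
      · rw [hterm, hs, if_neg (by omega), ← heq, pvS_single]; ring
      · rw [hterm, hs, if_pos hlt]
        have hl := pvS_last r i (j-1) (by omega)
        rw [show j - 1 + 1 = j from by omega] at hl
        rw [hl]
    have hsh1 := pvShape_set2 hsh i j s' hi
    refine ⟨pvShape_set2 hsh1 j i s' hjn, ?_, ?_⟩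
    · show s' = if i < j + 1 then pvS r i (j + 1 - 1) else 0
      rw [if_pos (by omega), show j + 1 - 1 = j from by omega, hv]
    · intro a b ha hb2
      show pvGet2 (pvSet2 (pvSet2 st.1 i j s') j i s') a b = _
      rw [pvGet2_set2 hsh1 hjn hi _ a b, pvGet2_set2 hsh hi hjn _ a b]
      by_cases c1 : a = j ∧ b = i
      · rw [if_pos c1, if_pos (by omega), show min a b = i from by omega,
          show max a b = j from by omega, hv]
      · by_cases c2 : a = i ∧ b = j
        · rw [if_neg c1, if_pos c2, if_pos (by omega), show min a b = i from by omega,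
            show max a b = j from by omega, hv]
        · rw [if_neg c1, if_neg c2, hent a b ha hb2]
          exact if_congr (by omega) rfl rfl

theorem portB_final (r : List (List Int)) :
    pvShape r.length (calcule_S_i_j_alt r) ∧ ∀ a b : Nat, a < r.length → b < r.length →
      pvGet2 (calcule_S_i_j_alt r) a b = pvS r (min a b) (max a b) := by
  have hB : calcule_S_i_j_alt r
      = (List.range r.length).foldl (fun out i => (pvB_inner r (pvB_pref r) i out).1)
          (pvZeros r.length) := rfl
  have key := pvFoldInv (fun out i => (pvB_inner r (pvB_pref r) i out).1)
    (fun c out => pvStateB r c out) 0 r.length (pvZeros r.length) ?_ ?_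
  · rw [show (0 : Nat) + r.length = r.length from by omega] at key
    rw [hB, List.range_eq_range']
    refine ⟨key.1, ?_⟩
    intro a b ha hb
    rw [key.2 a b ha hb, if_pos (by omega)]
  · refine ⟨pvShape_zeros _, ?_⟩
    intro a b ha hb
    rw [pvGet2_zeros, if_neg (by omega)]
  · intro i out _ hi hout
    exact pvB_inner_state r i (by omega) out hout

-- ===== VERDICT (by name: the statement is the Claim_ definition above) =====
theorem calcule_S_i_j_spec : Claim_equal_calcule_S_i_j := by
  intro r _ _
  unfold Spec_calcule_S_i_j
  obtain ⟨sA, eA⟩ := portA_final r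
  obtain ⟨sB, eB⟩ := portB_final r
  exact pvShape_ext sA sB (fun a b ha hb => (eA a b ha hb).trans (eB a b ha hb).symm)
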